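-- pv_equiv track=rewrite | github.com/j4redux/document-agent | tools/file_tools.py | _infer_language
-- ===== SOURCE A (Python) =====
-- from typing import Optional
--
-- def _infer_language(file_pattern: str) -> Optional[str]:
--     """Infer programming language from file pattern."""
--     extension_map = {
--         "*.py": "python",
--         "*.js": "javascript",
--         "*.jsx": "javascript",
--         "*.ts": "typescript",
--         "*.tsx": "typescript",
--         "*.java": "java",
--         "*.c": "c",
--         "*.cpp": "cpp",
--         "*.cc": "cpp",
--         "*.cxx": "cpp",
--         "*.cs": "csharp",
--         "*.go": "go",
--         "*.rs": "rust",
--         "*.rb": "ruby",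
--         "*.php": "php",
--         "*.swift": "swift",
--         "*.kt": "kotlin",
--         "*.scala": "scala",
--         "*.r": "r",
--         "*.lua": "lua",
--         "*.dart": "dart",
--         "*.elm": "elm",
--         "*.ex": "elixir",
--         "*.exs": "elixir",
--     }
--
--     for pattern, lang in extension_map.items():
--         if file_pattern.endswith(pattern[1:]):  # Remove the * from pattern
--             return lang
--
--     return None
-- ===== SOURCE B (Python) =====
-- from typing import Optional
--
-- def _lang_for_ext(ext: str) -> Optional[str]:
--     """Dispatch on a bare extension, grouped by language."""
--     if ext == 'py': return 'python'
--     if ext in ('js', 'jsx'): return 'javascript'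
--     if ext in ('ts', 'tsx'): return 'typescript'
--     if ext == 'java': return 'java'
--     if ext == 'c': return 'c'
--     if ext in ('cpp', 'cc', 'cxx'): return 'cpp'
--     if ext == 'cs': return 'csharp'
--     if ext == 'go': return 'go'
--     if ext == 'rs': return 'rust'
--     if ext == 'rb': return 'ruby'
--     if ext == 'php': return 'php'
--     if ext == 'swift': return 'swift'
--     if ext == 'kt': return 'kotlin'
--     if ext == 'scala': return 'scala'
--     if ext == 'r': return 'r'
--     if ext == 'lua': return 'lua'
--     if ext == 'dart': return 'dart'
--     if ext == 'elm': return 'elm'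
--     if ext in ('ex', 'exs'): return 'elixir'
--     return None
--
-- def _infer_language(file_pattern: str) -> Optional[str]:
--     """Infer programming language from file pattern."""
--     if '.' not in file_pattern:
--         return None
--     return _lang_for_ext(file_pattern.rsplit('.', 1)[1])
-- ===== Notes on version B (the rewrite author's own statement) =====
-- stated objective: simpler
-- what changed: B computes the suffix after the last dot once and dispatches on that bare extension with a per-language if-chain, eliminating A's 24-iteration endswith scan over glob patterns.
import Mathlib
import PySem

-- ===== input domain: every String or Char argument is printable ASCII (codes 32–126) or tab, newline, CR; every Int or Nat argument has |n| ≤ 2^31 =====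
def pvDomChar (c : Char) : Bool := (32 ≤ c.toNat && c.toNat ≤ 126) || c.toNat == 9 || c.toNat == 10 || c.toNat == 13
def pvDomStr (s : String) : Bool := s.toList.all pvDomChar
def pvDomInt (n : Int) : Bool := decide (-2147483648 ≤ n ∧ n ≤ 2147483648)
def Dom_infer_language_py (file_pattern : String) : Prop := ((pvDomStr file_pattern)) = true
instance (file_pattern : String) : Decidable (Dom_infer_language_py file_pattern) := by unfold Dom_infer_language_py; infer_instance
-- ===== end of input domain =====

-- B computes the suffix after the last dot once and dispatches on it with a per-language if-chain, replacing A's 24-way endswith scan (objective: simpler).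

-- ===== PORT A =====
-- the loop 'for pattern, lang in extension_map.items(): if file_pattern.endswith(pattern[1:]): return lang'
def inferLoopA (file_pattern : String) : List (String × String) → Option String
  | [] => none
  | (pattern, lang) :: rest =>
    if PySem.Str.endswith file_pattern (PySem.Str.slice pattern (some 1) none) then some lang
    else inferLoopA file_pattern rest

def infer_language_py (file_pattern : String) : Option String :=
  let extension_map : PySem.Dict String String := PySem.Dict.ofList
    [("*.py", "python"), ("*.js", "javascript"), ("*.jsx", "javascript"),
     ("*.ts", "typescript"), ("*.tsx", "typescript"), ("*.java", "java"),
     ("*.c", "c"), ("*.cpp", "cpp"), ("*.cc", "cpp"), ("*.cxx", "cpp"),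
     ("*.cs", "csharp"), ("*.go", "go"), ("*.rs", "rust"), ("*.rb", "ruby"),
     ("*.php", "php"), ("*.swift", "swift"), ("*.kt", "kotlin"), ("*.scala", "scala"),
     ("*.r", "r"), ("*.lua", "lua"), ("*.dart", "dart"), ("*.elm", "elm"),
     ("*.ex", "elixir"), ("*.exs", "elixir")]
  inferLoopA file_pattern extension_map.items

-- ===== PORT B =====
-- _lang_for_ext: tuple membership 'ext in (u, v)' is ported as the disjunction of equalities
def langForExt (ext : String) : Option String :=
  if ext == "py" then some "python"
  else if ext == "js" || ext == "jsx" then some "javascript"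
  else if ext == "ts" || ext == "tsx" then some "typescript"
  else if ext == "java" then some "java"
  else if ext == "c" then some "c"
  else if ext == "cpp" || ext == "cc" || ext == "cxx" then some "cpp"
  else if ext == "cs" then some "csharp"
  else if ext == "go" then some "go"
  else if ext == "rs" then some "rust"
  else if ext == "rb" then some "ruby"
  else if ext == "php" then some "php"
  else if ext == "swift" then some "swift"
  else if ext == "kt" then some "kotlin"
  else if ext == "scala" then some "scala"
  else if ext == "r" then some "r"
  else if ext == "lua" then some "lua"
  else if ext == "dart" then some "dart"
  else if ext == "elm" then some "elm"
  else if ext == "ex" || ext == "exs" then some "elixir"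
  else none

def infer_language_py_alt (file_pattern : String) : Option String :=
  if PySem.Str.isIn "." file_pattern then
    -- file_pattern.rsplit('.', 1)[1], ported by hand: the suffix after the LAST dot
    -- (exact here, since the pattern contains a dot)
    langForExt (String.ofList ((file_pattern.toList.reverse.takeWhile (· ≠ '.')).reverse))
  else none

-- ===== PRECONDITION & SPEC =====
def Spec_infer_language_py (file_pattern : String) (out : Option String) : Prop := out = infer_language_py_alt file_pattern
instance (file_pattern : String) (out : Option String) : Decidable (Spec_infer_language_py file_pattern out) := by unfold Spec_infer_language_py; infer_instance

-- ===== CLAIM (what is proved, stated in full; the proofs are below) =====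
def Claim_equal_infer_language_py : Prop := ∀ (file_pattern : String), Dom_infer_language_py file_pattern → Spec_infer_language_py file_pattern (infer_language_py file_pattern)

-- ===== LEMMAS AND PROOFS =====

-- (e ++ ['.']) is a prefix of r  ↔  a dot occurs in r and the maximal dot-free prefix of r is e
theorem pv_key (r e : List Char) (he : '.' ∉ e) :
    ((e ++ ['.']) <+: r) ↔ ('.' ∈ r ∧ r.takeWhile (· ≠ '.') = e) := by
  induction r generalizing e with
  | nil => simp [List.prefix_nil]
  | cons a r' ih =>
    by_cases ha : a = '.'
    · subst ha
      cases e with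
      | nil =>
        rw [List.takeWhile_cons_of_neg (by simp)]
        simp
      | cons b e' =>
        have hb : b ≠ '.' := fun h => he (by simp [h])
        constructor
        · intro hp
          rw [List.cons_append, List.cons_prefix_cons] at hp
          exact absurd hp.1 hb
        · rintro ⟨-, htw⟩
          rw [List.takeWhile_cons_of_neg (by simp)] at htw
          exact absurd htw (by simp)
    · cases e with
      | nil =>
        constructor
        · intro hp
          rw [List.nil_append, List.cons_prefix_cons] at hp
          exact absurd hp.1.symm ha
        · rintro ⟨hm, htw⟩
          rw [List.takeWhile_cons_of_pos (by simp [ha])] at htw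
          exact absurd htw (by simp)
      | cons b e' =>
        have he' : '.' ∉ e' := fun h => he (by simp [h])
        by_cases hab : a = b
        · subst hab
          rw [List.cons_append, List.cons_prefix_cons,
            List.takeWhile_cons_of_pos (by simp [ha])]
          constructor
          · rintro ⟨-, hp⟩
            obtain ⟨hm, htw⟩ := (ih e' he').mp hp
            exact ⟨by simp [hm], by rw [htw]⟩
          · rintro ⟨hm, htw⟩
            have hm' : '.' ∈ r' := by
              rcases List.mem_cons.mp hm with h | h
              · exact absurd h.symm ha
              · exact h
            obtain ⟨-, htw'⟩ := List.cons.injEq .. ▸ htw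
            exact ⟨rfl, (ih e' he').mpr ⟨hm', htw'⟩⟩
        · constructor
          · intro hp
            rw [List.cons_append, List.cons_prefix_cons] at hp
            exact absurd hp.1 (fun h => hab h.symm)
          · rintro ⟨-, htw⟩
            rw [List.takeWhile_cons_of_pos (by simp [ha])] at htw
            obtain ⟨h1, -⟩ := List.cons.injEq .. ▸ htw
            exact absurd h1 hab

theorem pv_endswith_iff (s p : String) (e : List Char) (ht : p.toList = '.' :: e) (he : '.' ∉ e) :
    PySem.Str.endswith s p = true ↔
      ('.' ∈ s.toList ∧ (s.toList.reverse.takeWhile (· ≠ '.')).reverse = e) := by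
  rw [show PySem.Str.endswith s p = PySem.Chars.endswith s.toList p.toList from by simp,
    PySem.Chars.endswith_iff, ht, ← List.reverse_prefix,
    show ('.' :: e).reverse = e.reverse ++ ['.'] from by simp,
    pv_key s.toList.reverse e.reverse (by simpa using he)]
  constructor
  · rintro ⟨hm, htw⟩
    exact ⟨by simpa using hm, by rw [htw, List.reverse_reverse]⟩
  · rintro ⟨hm, htw⟩
    refine ⟨by simpa using hm, ?_⟩
    have h2 := congrArg List.reverse htw
    rwa [List.reverse_reverse] at h2

theorem pv_isIn_dot (s : String) : PySem.Str.isIn "." s = true ↔ '.' ∈ s.toList := by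
  rw [show PySem.Str.isIn "." s = PySem.Chars.isIn ".".toList s.toList from by simp,
    PySem.Chars.isIn_iff_infix]
  constructor
  · intro h
    have hd : ('.' : Char) ∈ (".".toList : List Char) := by decide
    exact List.Sublist.mem hd h.sublist
  · intro h
    obtain ⟨l, t, hlt⟩ := List.mem_iff_append.mp h
    exact ⟨l, t, by rw [hlt]; simp⟩

theorem pv_endswith_false (s p : String) (e : List Char) (hp : p.toList = '.' :: e)
    (he : '.' ∉ e) (h : '.' ∉ s.toList) : PySem.Str.endswith s p = false := by
  cases hb : PySem.Str.endswith s p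
  · rfl
  · exact absurd ((pv_endswith_iff s p e hp he).mp hb).1 h

theorem pv_cond (s p q : String) (e : List Char) (hp : p.toList = '.' :: e) (hq : q.toList = e)
    (he : '.' ∉ e) (hdot : '.' ∈ s.toList) :
    PySem.Str.endswith s p
      = (String.ofList ((s.toList.reverse.takeWhile (· ≠ '.')).reverse) == q) := by
  rw [Bool.eq_iff_iff, pv_endswith_iff s p e hp he, beq_iff_eq]
  constructor
  · rintro ⟨-, hx⟩
    rw [hx, ← hq, String.ofList_toList]
  · intro hqe
    refine ⟨hdot, ?_⟩
    have h := congrArg String.toList hqe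
    simp only [String.toList_ofList] at h
    rw [h, hq]

theorem pv_if_or {α : Type} (a b : Bool) (x y : α) :
    (if (a || b) then x else y) = if a then x else if b then x else y := by
  cases a <;> cases b <;> simp

theorem pv_if_or3 {α : Type} (a b c : Bool) (x y : α) :
    (if (a || b || c) then x else y) = if a then x else if b then x else if c then x else y := by
  cases a <;> cases b <;> cases c <;> simp

-- ===== VERDICT (by name: the statement is the Claim_ definition above) =====
theorem infer_language_py_spec : Claim_equal_infer_language_py := by
  intro s _
  have hA : infer_language_py s = inferLoopA s
    [("*.py", "python"), ("*.js", "javascript"), ("*.jsx", "javascript"),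
     ("*.ts", "typescript"), ("*.tsx", "typescript"), ("*.java", "java"),
     ("*.c", "c"), ("*.cpp", "cpp"), ("*.cc", "cpp"), ("*.cxx", "cpp"),
     ("*.cs", "csharp"), ("*.go", "go"), ("*.rs", "rust"), ("*.rb", "ruby"),
     ("*.php", "php"), ("*.swift", "swift"), ("*.kt", "kotlin"), ("*.scala", "scala"),
     ("*.r", "r"), ("*.lua", "lua"), ("*.dart", "dart"), ("*.elm", "elm"),
     ("*.ex", "elixir"), ("*.exs", "elixir")] := rfl
  have hB : infer_language_py_alt s =
      (if PySem.Str.isIn "." s then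
        langForExt (String.ofList ((s.toList.reverse.takeWhile (· ≠ '.')).reverse))
      else none) := rfl
  unfold Spec_infer_language_py
  rw [hA, hB]
  by_cases hdot : '.' ∈ s.toList
  · rw [if_pos ((pv_isIn_dot s).mpr hdot)]
    simp only [inferLoopA, langForExt]
    rw [pv_cond s (PySem.Str.slice "*.py" (some 1) none) "py" ['p', 'y'] (by decide) (by decide) (by decide) hdot,
      pv_cond s (PySem.Str.slice "*.js" (some 1) none) "js" ['j', 's'] (by decide) (by decide) (by decide) hdot,
      pv_cond s (PySem.Str.slice "*.jsx" (some 1) none) "jsx" ['j', 's', 'x'] (by decide) (by decide) (by decide) hdot,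
      pv_cond s (PySem.Str.slice "*.ts" (some 1) none) "ts" ['t', 's'] (by decide) (by decide) (by decide) hdot,
      pv_cond s (PySem.Str.slice "*.tsx" (some 1) none) "tsx" ['t', 's', 'x'] (by decide) (by decide) (by decide) hdot,
      pv_cond s (PySem.Str.slice "*.java" (some 1) none) "java" ['j', 'a', 'v', 'a'] (by decide) (by decide) (by decide) hdot,
      pv_cond s (PySem.Str.slice "*.c" (some 1) none) "c" ['c'] (by decide) (by decide) (by decide) hdot,
      pv_cond s (PySem.Str.slice "*.cpp" (some 1) none) "cpp" ['c', 'p', 'p'] (by decide) (by decide) (by decide) hdot,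
      pv_cond s (PySem.Str.slice "*.cc" (some 1) none) "cc" ['c', 'c'] (by decide) (by decide) (by decide) hdot,
      pv_cond s (PySem.Str.slice "*.cxx" (some 1) none) "cxx" ['c', 'x', 'x'] (by decide) (by decide) (by decide) hdot,
      pv_cond s (PySem.Str.slice "*.cs" (some 1) none) "cs" ['c', 's'] (by decide) (by decide) (by decide) hdot,
      pv_cond s (PySem.Str.slice "*.go" (some 1) none) "go" ['g', 'o'] (by decide) (by decide) (by decide) hdot,
      pv_cond s (PySem.Str.slice "*.rs" (some 1) none) "rs" ['r', 's'] (by decide) (by decide) (by decide) hdot,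
      pv_cond s (PySem.Str.slice "*.rb" (some 1) none) "rb" ['r', 'b'] (by decide) (by decide) (by decide) hdot,
      pv_cond s (PySem.Str.slice "*.php" (some 1) none) "php" ['p', 'h', 'p'] (by decide) (by decide) (by decide) hdot,
      pv_cond s (PySem.Str.slice "*.swift" (some 1) none) "swift" ['s', 'w', 'i', 'f', 't'] (by decide) (by decide) (by decide) hdot,
      pv_cond s (PySem.Str.slice "*.kt" (some 1) none) "kt" ['k', 't'] (by decide) (by decide) (by decide) hdot,
      pv_cond s (PySem.Str.slice "*.scala" (some 1) none) "scala" ['s', 'c', 'a', 'l', 'a'] (by decide) (by decide) (by decide) hdot,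
      pv_cond s (PySem.Str.slice "*.r" (some 1) none) "r" ['r'] (by decide) (by decide) (by decide) hdot,
      pv_cond s (PySem.Str.slice "*.lua" (some 1) none) "lua" ['l', 'u', 'a'] (by decide) (by decide) (by decide) hdot,
      pv_cond s (PySem.Str.slice "*.dart" (some 1) none) "dart" ['d', 'a', 'r', 't'] (by decide) (by decide) (by decide) hdot,
      pv_cond s (PySem.Str.slice "*.elm" (some 1) none) "elm" ['e', 'l', 'm'] (by decide) (by decide) (by decide) hdot,
      pv_cond s (PySem.Str.slice "*.ex" (some 1) none) "ex" ['e', 'x'] (by decide) (by decide) (by decide) hdot,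
      pv_cond s (PySem.Str.slice "*.exs" (some 1) none) "exs" ['e', 'x', 's'] (by decide) (by decide) (by decide) hdot,
      pv_if_or, pv_if_or, pv_if_or3, pv_if_or]
  · rw [if_neg (fun hIn => hdot ((pv_isIn_dot s).mp hIn))]
    simp only [inferLoopA]
    rw [pv_endswith_false s (PySem.Str.slice "*.py" (some 1) none) ['p', 'y'] (by decide) (by decide) hdot,
      pv_endswith_false s (PySem.Str.slice "*.js" (some 1) none) ['j', 's'] (by decide) (by decide) hdot,
      pv_endswith_false s (PySem.Str.slice "*.jsx" (some 1) none) ['j', 's', 'x'] (by decide) (by decide) hdot,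
      pv_endswith_false s (PySem.Str.slice "*.ts" (some 1) none) ['t', 's'] (by decide) (by decide) hdot,
      pv_endswith_false s (PySem.Str.slice "*.tsx" (some 1) none) ['t', 's', 'x'] (by decide) (by decide) hdot,
      pv_endswith_false s (PySem.Str.slice "*.java" (some 1) none) ['j', 'a', 'v', 'a'] (by decide) (by decide) hdot,
      pv_endswith_false s (PySem.Str.slice "*.c" (some 1) none) ['c'] (by decide) (by decide) hdot,
      pv_endswith_false s (PySem.Str.slice "*.cpp" (some 1) none) ['c', 'p', 'p'] (by decide) (by decide) hdot,
      pv_endswith_false s (PySem.Str.slice "*.cc" (some 1) none) ['c', 'c'] (by decide) (by decide) hdot,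
      pv_endswith_false s (PySem.Str.slice "*.cxx" (some 1) none) ['c', 'x', 'x'] (by decide) (by decide) hdot,
      pv_endswith_false s (PySem.Str.slice "*.cs" (some 1) none) ['c', 's'] (by decide) (by decide) hdot,
      pv_endswith_false s (PySem.Str.slice "*.go" (some 1) none) ['g', 'o'] (by decide) (by decide) hdot,
      pv_endswith_false s (PySem.Str.slice "*.rs" (some 1) none) ['r', 's'] (by decide) (by decide) hdot,
      pv_endswith_false s (PySem.Str.slice "*.rb" (some 1) none) ['r', 'b'] (by decide) (by decide) hdot,
      pv_endswith_false s (PySem.Str.slice "*.php" (some 1) none) ['p', 'h', 'p'] (by decide) (by decide) hdot,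
      pv_endswith_false s (PySem.Str.slice "*.swift" (some 1) none) ['s', 'w', 'i', 'f', 't'] (by decide) (by decide) hdot,
      pv_endswith_false s (PySem.Str.slice "*.kt" (some 1) none) ['k', 't'] (by decide) (by decide) hdot,
      pv_endswith_false s (PySem.Str.slice "*.scala" (some 1) none) ['s', 'c', 'a', 'l', 'a'] (by decide) (by decide) hdot,
      pv_endswith_false s (PySem.Str.slice "*.r" (some 1) none) ['r'] (by decide) (by decide) hdot,
      pv_endswith_false s (PySem.Str.slice "*.lua" (some 1) none) ['l', 'u', 'a'] (by decide) (by decide) hdot,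
      pv_endswith_false s (PySem.Str.slice "*.dart" (some 1) none) ['d', 'a', 'r', 't'] (by decide) (by decide) hdot,
      pv_endswith_false s (PySem.Str.slice "*.elm" (some 1) none) ['e', 'l', 'm'] (by decide) (by decide) hdot,
      pv_endswith_false s (PySem.Str.slice "*.ex" (some 1) none) ['e', 'x'] (by decide) (by decide) hdot,
      pv_endswith_false s (PySem.Str.slice "*.exs" (some 1) none) ['e', 'x', 's'] (by decide) (by decide) hdot]
    simp
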